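-- pv_equiv track=rewrite | github.com/nchorro/codigos_de_python_tfg_noelia_chorro | aplicacion_con_algebra_lineal.py | entrelazado
-- ===== SOURCE A (Python) =====
-- def entrelazado(bloques):
--     e = []
--     for k in range(len(bloques[0])):
--         for j in range(len(bloques)):
--             e.append(bloques[j][k])
--     ent = []
--     for t in range(0, len(e), len(bloques[0])):
--         ent.append(e[t: t+len(bloques[0])])
--     return ent
-- ===== SOURCE B (Python) =====
-- def entrelazado(bloques):
--     n = len(bloques)
--     m = len(bloques[0])
--     return [[bloques[(r * m + i) % n][(r * m + i) // n] for i in range(m)]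
--             for r in range(n)]
-- ===== Notes on version B (the rewrite author's own statement) =====
-- stated objective: alternative
-- what changed: A flattens the blocks column-major into an intermediate list e and then re-chunks e into rows of length m in a second pass; B emits each output cell directly in one nested pass over the output shape, computing cell (r,i) as bloques[(r*m+i)%n][(r*m+i)//n], with no intermediate flat list.
import Mathlib
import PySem

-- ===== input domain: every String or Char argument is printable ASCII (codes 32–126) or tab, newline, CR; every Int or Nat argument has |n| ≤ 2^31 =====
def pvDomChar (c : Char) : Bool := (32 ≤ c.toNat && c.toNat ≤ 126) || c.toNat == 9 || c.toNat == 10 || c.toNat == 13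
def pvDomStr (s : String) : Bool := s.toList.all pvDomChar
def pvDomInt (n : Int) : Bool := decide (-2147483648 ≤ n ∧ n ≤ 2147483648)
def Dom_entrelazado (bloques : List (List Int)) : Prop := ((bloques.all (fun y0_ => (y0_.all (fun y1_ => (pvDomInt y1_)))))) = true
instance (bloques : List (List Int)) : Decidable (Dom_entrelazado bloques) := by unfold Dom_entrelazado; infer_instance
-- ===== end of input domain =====

-- B replaces A's two sequential passes (column-major flatten, then re-chunk into
-- rows of length m) by directly emitting each output cell with index arithmetic;
-- objective: alternative (one pass over the output shape, no intermediate list).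

-- ===== PORT A =====
def entrelazado (bloques : List (List Int)) : List (List Int) :=
  let m : Int := ((PySem.List.pyGetD bloques 0 []).length : Int)
  let e : List Int :=
    (PySem.List.pyRange 0 m 1).foldl (fun acc k =>
      (PySem.List.pyRange 0 (bloques.length : Int) 1).foldl (fun acc2 j =>
        acc2 ++ [PySem.List.pyGetD (PySem.List.pyGetD bloques j []) k 0]) acc) []
  (PySem.List.pyRange 0 (e.length : Int) m).foldl (fun acc t =>
    acc ++ [PySem.List.slice e (some t) (some (t + m))]) []

-- ===== PORT B =====
def entrelazado_alt (bloques : List (List Int)) : List (List Int) :=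
  let n : Int := (bloques.length : Int)
  let m : Int := ((PySem.List.pyGetD bloques 0 []).length : Int)
  (PySem.List.pyRange 0 n 1).map (fun r =>
    (PySem.List.pyRange 0 m 1).map (fun i =>
      PySem.List.pyGetD
        (PySem.List.pyGetD bloques (PySem.Int.mod (r * m + i) n) [])
        (PySem.Int.floordiv (r * m + i) n) 0))

-- ===== PRECONDITION & SPEC =====
-- Pre_ excludes exactly the inputs where A raises: an empty list of blocks
-- (IndexError on bloques[0]), an empty first block (range step 0 → ValueError),
-- and a later block shorter than the first (IndexError in the inner loop).
def Pre_entrelazado (bloques : List (List Int)) : Prop :=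
  bloques ≠ [] ∧ 0 < (bloques.headD []).length ∧
    ∀ row ∈ bloques, (bloques.headD []).length ≤ row.length
instance (bloques : List (List Int)) : Decidable (Pre_entrelazado bloques) := by
  unfold Pre_entrelazado; infer_instance
def pvWitness_entrelazado : List (List Int) := [[1, 2, 3], [4, 5, 6]]

def Spec_entrelazado (bloques : List (List Int)) (out : List (List Int)) : Prop := out = entrelazado_alt bloques
instance (bloques : List (List Int)) (out : List (List Int)) : Decidable (Spec_entrelazado bloques out) := by unfold Spec_entrelazado; infer_instance

-- ===== CLAIM (what is proved, stated in full; the proofs are below) =====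
def Claim_equal_entrelazado : Prop := ∀ (bloques : List (List Int)), Dom_entrelazado bloques → Pre_entrelazado bloques → Spec_entrelazado bloques (entrelazado bloques)

-- ===== LEMMAS AND PROOFS =====

-- the value A and B both read for cell (j, k)
def pvVal (bloques : List (List Int)) (j k : Nat) : Int :=
  (bloques.getD j []).getD k 0

-- length of the column-major flatten
theorem pvFlatLen (g : Nat → Nat → Int) (M N : Nat) :
    ((List.range M).flatMap (fun k => (List.range N).map (fun j => g k j))).length = M * N := by
  induction M with
  | zero => simp
  | succ M ih => simp [List.range_succ, ih, Nat.succ_mul]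

-- indexing the column-major flatten
theorem pvFlatGet (g : Nat → Nat → Int) (M N p : Nat) (hp : p < M * N) :
    ((List.range M).flatMap (fun k => (List.range N).map (fun j => g k j)))[p]? =
      some (g (p / N) (p % N)) := by
  induction M with
  | zero => omega
  | succ M ih =>
    rw [List.range_succ, List.flatMap_append]
    have hstep : (M + 1) * N = M * N + N := by ring
    by_cases h : p < M * N
    · rw [List.getElem?_append_left (by rw [pvFlatLen]; exact h)]
      exact ih h
    · have hN : 0 < N := by by_contra h0; omega
      have hlen : ((List.range M).flatMap (fun k => (List.range N).map (fun j => g k j))).length = M * N := pvFlatLen g M N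
      have hge : M * N ≤ p := by omega
      rw [List.getElem?_append_right (by omega)]
      have hlt : p - M * N < N := by omega
      rw [hlen]
      have hdiv : p / N = M := Nat.div_eq_of_lt_le hge (by omega)
      have hNd := Nat.div_add_mod p N
      rw [hdiv] at hNd
      have hcomm : N * M = M * N := Nat.mul_comm N M
      have hmod : p % N = p - M * N := by omega
      rw [hdiv, hmod]
      simp [List.getElem?_map, List.getElem?_range hlt]

theorem pvFlatLenD (g : Nat → Nat → Int) (M N : Nat) :
    ((List.range M).flatMap (fun k => (List.range N).map (fun j => g k j))).length = M * N :=
  pvFlatLen g M N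

theorem pvFlatGetD (g : Nat → Nat → Int) (M N p : Nat) (hp : p < M * N) :
    ((List.range M).flatMap (fun k => (List.range N).map (fun j => g k j))).getD p 0 =
      g (p / N) (p % N) := by
  rw [List.getD_eq_getElem?_getD, pvFlatGet g M N p hp]; rfl

-- the count of A's chunking range: ceil((m*n)/m) = n for 0 < m
theorem pvCount (m n : Nat) (hm0 : 0 < m) :
    ((((m * n : Nat) : Int) - 0 + (m : Int) - 1) / (m : Int)).toNat = n := by
  have h1 : (((m * n : Nat) : Int) - 0 + (m : Int) - 1) = ((m * n + m - 1 : Nat) : Int) := by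
    rw [Nat.cast_sub (by omega)]; push_cast; ring
  rw [h1, ← Int.natCast_div]
  have hcomm : n * m = m * n := Nat.mul_comm n m
  have h2 : (m * n + m - 1) / m = n := Nat.div_eq_of_lt_le (by omega) (by
    have : (n + 1) * m = n * m + m := by ring
    omega)
  rw [h2, Int.toNat_natCast]

-- take/drop of a list as a map over indices
theorem pvTakeDrop (L : List Int) (a m : Nat) (h : a + m ≤ L.length) :
    (L.drop a).take m = (List.range m).map (fun i => L.getD (a + i) 0) := by
  apply List.ext_getElem
  · simp; omega
  · intro i h1 h2
    have hi : i < m := by simpa using h2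
    have hai : a + i < L.length := by omega
    simp [List.getElem_take, List.getElem_drop, List.getD_eq_getElem?_getD,
      List.getElem?_eq_getElem hai]

theorem entrelazado_eq (bloques : List (List Int)) (hpre : Pre_entrelazado bloques) :
    entrelazado bloques = entrelazado_alt bloques := by
  obtain ⟨hne, hm0, hrows⟩ := hpre
  have hhead : PySem.List.pyGetD bloques 0 [] = bloques.headD [] := by
    cases bloques with
    | nil => exact absurd rfl hne
    | cons a l => simp [PySem.List.pyGetD_zero]
  set n := bloques.length with hn
  set m := (bloques.headD []).length with hm
  have hn0 : 0 < n := List.length_pos_iff.mpr hne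
  -- the flattened list built by A's first loop
  have hE : ((List.range m).flatMap
      (fun k => (List.range n).map (fun j => pvVal bloques j k))).length = m * n :=
    pvFlatLen _ m n
  unfold entrelazado entrelazado_alt
  rw [hhead]
  simp only [PySem.List.foldl_append_singleton_eq_map, PySem.List.foldl_append_eq_flatMap,
    PySem.List.pyRange_zero_nat, List.flatMap_map, List.map_map, List.nil_append]
  simp only [Function.comp_def, PySem.List.pyGetD_natCast]
  rw [← hn, ← hm]
  simp only [pvFlatLenD]
  rw [PySem.List.pyRange_of_pos 0 ((m * n : Nat) : Int) (by exact_mod_cast hm0)]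
  rw [if_pos (by exact_mod_cast Nat.mul_pos hm0 hn0)]
  rw [pvCount m n hm0]
  simp only [List.map_map, Function.comp_def, zero_add, ← Nat.cast_mul, ← Nat.cast_add,
    PySem.Int.mod_natCast, PySem.Int.floordiv_natCast,
    PySem.List.pyGetD_natCast]
  apply List.map_congr_left
  intro t ht
  have htn : t < n := List.mem_range.mp ht
  rw [show ((m * t + m : Nat) : Int) = ((m * t : Nat) : Int) + ((m : Nat) : Int) from by
        push_cast; ring,
    PySem.List.slice_natCast_add]
  rw [pvTakeDrop _ (m * t) m (by rw [pvFlatLenD]; nlinarith)]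
  apply List.map_congr_left
  intro i hi
  have him : i < m := List.mem_range.mp hi
  have hp : m * t + i < m * n := by nlinarith
  rw [pvFlatGetD _ m n _ hp, Nat.mul_comm m t]

-- ===== VERDICT (by name: the statement is the Claim_ definition above) =====
theorem entrelazado_spec : Claim_equal_entrelazado := by
  intro bloques _ hpre
  unfold Spec_entrelazado
  exact entrelazado_eq bloques hpre
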